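-- pv_equiv track=rewrite | github.com/rkdbq/PNID | rkdbq/text_split_merge/text_merge_from_xml.py | __get_merged_text
-- ===== SOURCE A (Python) =====
-- def __get_merged_text(remain_str: str, remove_str: str):
--     remain_len = len(remain_str)
--     remove_len = len(remove_str)
--
--     common_len = 0
--     for i in range(1, min(remain_len, remove_len) + 1):
--         if remain_str[-i:] == remove_str[:i]:
--             common_len = i
--
--     merged_str = remain_str + remove_str[common_len:]
--     return merged_str
-- ===== SOURCE B (Python) =====
-- def __get_merged_text(remain_str: str, remove_str: str):
--     # start from the longest candidate suffix and shrink until it is a prefix of remove_str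
--     suffix = remain_str[len(remain_str) - min(len(remain_str), len(remove_str)):]
--     while not remove_str.startswith(suffix):
--         suffix = suffix[1:]
--     return remain_str + remove_str[len(suffix):]
-- ===== Notes on version B (the rewrite author's own statement) =====
-- stated objective: alternative
-- what changed: A scans overlap lengths upward (1..min) re-testing every slice pair and keeping the last match in an accumulator; B instead takes the longest candidate suffix of remain_str and shrinks it one character at a time with remove_str.startswith until it matches, returning at the first (i.e. longest) hit.
import Mathlib
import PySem

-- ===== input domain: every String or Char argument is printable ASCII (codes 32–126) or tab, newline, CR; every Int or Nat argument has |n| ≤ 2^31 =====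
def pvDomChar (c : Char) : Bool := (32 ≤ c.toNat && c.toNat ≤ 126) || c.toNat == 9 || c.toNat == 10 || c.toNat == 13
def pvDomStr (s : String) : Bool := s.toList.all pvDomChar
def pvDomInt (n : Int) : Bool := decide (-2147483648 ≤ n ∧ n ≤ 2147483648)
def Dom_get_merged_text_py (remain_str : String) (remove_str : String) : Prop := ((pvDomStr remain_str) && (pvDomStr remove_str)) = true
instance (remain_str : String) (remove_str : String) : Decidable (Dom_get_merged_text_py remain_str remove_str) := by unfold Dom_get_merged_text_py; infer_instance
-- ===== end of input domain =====

-- B replaces A's ascending last-match scan over all overlap lengths by a descending shrink-the-suffix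
-- loop using startswith, returning at the first (longest) match; objective: alternative decomposition.

-- ===== PORT A =====
-- A: for i in 1..min, keep the LAST i with remain_str[-i:] == remove_str[:i] in an accumulator.
def get_merged_text_py (remain_str : String) (remove_str : String) : String :=
  let ra := remain_str.toList
  let rv := remove_str.toList
  let remain_len : Int := ra.length
  let remove_len : Int := rv.length
  let common_len : Int :=
    (PySem.List.pyRange 1 (min remain_len remove_len + 1)).foldl
      (fun acc i =>
        if PySem.List.slice ra (some (-i)) none == PySem.List.slice rv none (some i) then i
        else acc) 0
  String.ofList (ra ++ PySem.List.slice rv (some common_len) none)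

-- ===== PORT B =====
-- B's while loop: drop the first character of the candidate suffix until remove_str startswith it.
def overlapSuffix (rv : List Char) : List Char → List Char
  | [] => []
  | c :: s => if (c :: s).isPrefixOf rv then c :: s else overlapSuffix rv s

def get_merged_text_py_alt (remain_str : String) (remove_str : String) : String :=
  let ra := remain_str.toList
  let rv := remove_str.toList
  let suffix := overlapSuffix rv
    (PySem.List.slice ra (some ((ra.length : Int) - min (ra.length : Int) (rv.length : Int))) none)
  String.ofList (ra ++ PySem.List.slice rv (some ((suffix.length : Nat) : Int)) none)

-- ===== PRECONDITION & SPEC =====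
def Spec_get_merged_text_py (remain_str : String) (remove_str : String) (out : String) : Prop := out = get_merged_text_py_alt remain_str remove_str
instance (remain_str : String) (remove_str : String) (out : String) : Decidable (Spec_get_merged_text_py remain_str remove_str out) := by unfold Spec_get_merged_text_py; infer_instance

-- ===== CLAIM (what is proved, stated in full; the proofs are below) =====
def Claim_equal_get_merged_text_py : Prop := ∀ (remain_str : String) (remove_str : String), Dom_get_merged_text_py remain_str remove_str → Spec_get_merged_text_py remain_str remove_str (get_merged_text_py remain_str remove_str)

-- ===== LEMMAS AND PROOFS =====

-- the common characterisation: largest m' ≤ m whose length-m' suffix of ra is a prefix of rv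
def pvDescend (ra rv : List Char) : Nat → Nat
  | 0 => 0
  | m + 1 => if ra.drop (ra.length - (m + 1)) = rv.take (m + 1) then m + 1 else pvDescend ra rv m

theorem foldl_eq_descend (ra rv : List Char) (m : Nat) :
    (PySem.List.pyRange 1 ((m : Int) + 1)).foldl
      (fun acc i =>
        if PySem.List.slice ra (some (-i)) none == PySem.List.slice rv none (some i) then i
        else acc) 0 = ((pvDescend ra rv m : Nat) : Int) := by
  induction m with
  | zero => simp [pvDescend]
  | succ m ih =>
    have h1 : ((m + 1 : Nat) : Int) + 1 = ((m : Int) + 1) + 1 := by push_cast; ring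
    rw [h1, PySem.List.pyRange_one_succ_right (by omega), List.foldl_append]
    simp only [List.foldl_cons, List.foldl_nil, ih]
    have h2 : -((m : Int) + 1) = -(((m + 1 : Nat) : Int)) := by push_cast; ring
    have h3 : (m : Int) + 1 = ((m + 1 : Nat) : Int) := by push_cast; ring
    rw [h2, PySem.List.slice_from_neg_natCast ra (m+1) (by omega)]
    rw [h3, PySem.List.slice_to_natCast]
    simp only [pvDescend, beq_iff_eq]
    split_ifs <;> simp

theorem overlap_eq_descend (ra rv : List Char) (m : Nat) (hm : m ≤ ra.length) :
    (overlapSuffix rv (ra.drop (ra.length - m))).length = pvDescend ra rv m := by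
  induction m with
  | zero => simp [overlapSuffix, pvDescend]
  | succ m ih =>
    have hlen : (ra.drop (ra.length - (m + 1))).length = m + 1 := by
      rw [List.length_drop]; omega
    cases ht : ra.drop (ra.length - (m + 1)) with
    | nil => simp [ht] at hlen
    | cons c s =>
      have hs : s = ra.drop (ra.length - m) := by
        have := List.tail_drop (l := ra) (i := ra.length - (m + 1))
        rw [ht] at this
        simp at this
        rw [this]; congr 1; omega
      have hiff : (c :: s).isPrefixOf rv ↔ ra.drop (ra.length - (m + 1)) = rv.take (m + 1) := by
        rw [List.isPrefixOf_iff_prefix, List.prefix_iff_eq_take, ← ht, hlen]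
      rw [overlapSuffix]
      by_cases h : ra.drop (ra.length - (m + 1)) = rv.take (m + 1)
      · rw [if_pos (hiff.mpr h)]
        show (c :: s).length = pvDescend ra rv (m + 1)
        rw [pvDescend, if_pos h, ← ht]
        exact hlen
      · rw [if_neg (fun hb => h (hiff.mp hb)), hs, ih (by omega), pvDescend, if_neg h]

theorem main_eq (r v : String) : get_merged_text_py r v = get_merged_text_py_alt r v := by
  unfold get_merged_text_py get_merged_text_py_alt
  simp only []
  set ra := r.toList with hra
  set rv := v.toList with hrv
  set n : Nat := min ra.length rv.length with hn
  have hmin : min (ra.length : Int) (rv.length : Int) = ((n : Nat) : Int) := by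
    rw [hn]; push_cast; rfl
  rw [hmin, foldl_eq_descend ra rv n]
  have hsub : (ra.length : Int) - ((n : Nat) : Int) = ((ra.length - n : Nat) : Int) := by
    have : n ≤ ra.length := by omega
    omega
  rw [hsub, PySem.List.slice_from_natCast (xs := ra),
    overlap_eq_descend ra rv n (by omega), PySem.List.slice_from_natCast]

-- ===== VERDICT (by name: the statement is the Claim_ definition above) =====
theorem get_merged_text_py_spec : Claim_equal_get_merged_text_py := by
  intro r v _
  exact main_eq r v
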